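-- pv_equiv track=rewrite | github.com/MahnazAkbariKasten/Algorithms_And_DataStructur_Challenges | codeInterviewCourse/circularArrayRotation/car.py | car
-- ===== SOURCE A (Python) =====
-- def car(o_arr, q_arr, k):
--     if len(o_arr) <= 1:
--         return o_arr
--     else:
--         res = []
--         for q in q_arr:
--             new_idx = (k + q + 1) % (len(o_arr))
--             res.append(o_arr[new_idx - 1])
--         return res
-- ===== SOURCE B (Python) =====
-- def car(o_arr, q_arr, k):
--     if len(o_arr) <= 1:
--         return o_arr
--     n = len(o_arr)
--     s = k % n
--     rot = o_arr[s:] + o_arr[:s]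
--     return [rot[q % n] for q in q_arr]
-- ===== Notes on version B (the rewrite author's own statement) =====
-- stated objective: faster
-- what changed: B materialises the rotated array once with two slices and answers every query by a direct table lookup at q % n, instead of recomputing the shifted modular index (k+q+1)%n - 1 with a negative-index wrap for every query.
import Mathlib
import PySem

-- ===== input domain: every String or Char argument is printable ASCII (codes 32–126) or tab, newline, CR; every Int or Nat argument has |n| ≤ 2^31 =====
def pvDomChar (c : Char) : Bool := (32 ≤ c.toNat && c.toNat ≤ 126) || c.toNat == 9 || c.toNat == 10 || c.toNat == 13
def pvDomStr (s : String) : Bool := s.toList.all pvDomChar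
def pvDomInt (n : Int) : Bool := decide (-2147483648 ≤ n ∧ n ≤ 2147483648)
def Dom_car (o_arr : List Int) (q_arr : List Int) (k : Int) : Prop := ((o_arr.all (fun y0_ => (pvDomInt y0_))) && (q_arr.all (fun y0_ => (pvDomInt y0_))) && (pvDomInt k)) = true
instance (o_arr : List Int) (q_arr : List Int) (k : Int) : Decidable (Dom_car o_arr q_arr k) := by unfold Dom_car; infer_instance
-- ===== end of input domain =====

-- B precomputes the rotated array once (two slices) and answers each query by a table lookup; alternative decomposition, same results.

-- ===== PORT A =====
def car (o_arr : List Int) (q_arr : List Int) (k : Int) : List Int :=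
  if o_arr.length ≤ 1 then o_arr
  else
    q_arr.foldl (fun res q =>
      res ++ [(PySem.List.pyGet? o_arr (PySem.Int.mod (k + q + 1) o_arr.length - 1)).getD 0]) []

-- ===== PORT B =====
def car_alt (o_arr : List Int) (q_arr : List Int) (k : Int) : List Int :=
  if o_arr.length ≤ 1 then o_arr
  else
    let n : Int := o_arr.length
    let s : Int := PySem.Int.mod k n
    let rot : List Int := PySem.List.slice o_arr (some s) none ++ PySem.List.slice o_arr none (some s)
    q_arr.map (fun q => (PySem.List.pyGet? rot (PySem.Int.mod q n)).getD 0)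

-- ===== PRECONDITION & SPEC =====
def Spec_car (o_arr : List Int) (q_arr : List Int) (k : Int) (out : List Int) : Prop := out = car_alt o_arr q_arr k
instance (o_arr : List Int) (q_arr : List Int) (k : Int) (out : List Int) : Decidable (Spec_car o_arr q_arr k out) := by unfold Spec_car; infer_instance

-- ===== CLAIM (what is proved, stated in full; the proofs are below) =====
def Claim_equal_car : Prop := ∀ (o_arr : List Int) (q_arr : List Int) (k : Int), Dom_car o_arr q_arr k → Spec_car o_arr q_arr k (car o_arr q_arr k)

-- ===== LEMMAS AND PROOFS =====

-- A's per-query value equals B's lookup into the rotated table, for every query q.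
lemma car_elem_eq (o : List Int) (h2 : 2 ≤ o.length) (k q : Int) :
    (PySem.List.pyGet? o (PySem.Int.mod (k + q + 1) o.length - 1)).getD 0
    = (PySem.List.pyGet? (PySem.List.slice o (some (PySem.Int.mod k o.length)) none
        ++ PySem.List.slice o none (some (PySem.Int.mod k o.length))) (PySem.Int.mod q o.length)).getD 0 := by
  have hN : (0:Int) < o.length := by omega
  rw [PySem.Int.mod_eq_emod_of_pos (a := k + q + 1) hN, PySem.Int.mod_eq_emod_of_pos (a := k) hN,
      PySem.Int.mod_eq_emod_of_pos (a := q) hN]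
  set N : Int := (o.length : Int) with hNdef
  set s : Int := k % N with hs
  set j : Int := q % N with hj
  have hs0 : 0 ≤ s := Int.emod_nonneg k (by omega)
  have hsN : s < N := Int.emod_lt_of_pos k hN
  have hj0 : 0 ≤ j := Int.emod_nonneg q (by omega)
  have hjN : j < N := Int.emod_lt_of_pos q hN
  -- rewrite slices
  rw [PySem.List.slice_from _ hs0, PySem.List.slice_to _ hs0]
  -- RHS value
  have hr : (k + q) % N = (s + j) % N := by
    rw [hs, hj, Int.add_emod]
  set r : Int := (k + q) % N with hrdef
  have hr0 : 0 ≤ r := Int.emod_nonneg _ (by omega)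
  have hrN : r < N := Int.emod_lt_of_pos _ hN
  have hlenrot : (o.drop s.toNat ++ o.take s.toNat).length = o.length := by
    simp; omega
  have hRHS : PySem.List.pyGet? (o.drop s.toNat ++ o.take s.toNat) j = o[r.toNat]? := by
    rw [PySem.List.pyGet?_of_nonneg _ hj0]
    by_cases hcase : s + j < N
    · have hrv : r = s + j := hr.trans (Int.emod_eq_of_lt (by omega) hcase)
      rw [List.getElem?_append_left (by simp; omega)]
      rw [List.getElem?_drop]
      congr 1
      omega
    · have hrv : r = s + j - N := by
        have h1 : (s + j) % N = (s + j - N) % N := (Int.sub_emod_right (s+j) N).symm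
        exact hr.trans (h1.trans (Int.emod_eq_of_lt (by omega) (by omega)))
      rw [List.getElem?_append_right (by simp; omega)]
      rw [List.getElem?_take_of_lt (by simp; omega)]
      congr 1
      simp only [List.length_drop]
      omega
  -- LHS
  have h1N : (1:Int) % N = 1 := Int.emod_eq_of_lt (by omega) (by omega)
  have hm : (k + q + 1) % N = (r + 1) % N := by
    rw [Int.add_emod (k+q) 1, ← hrdef, h1N]
  by_cases hcase : r = N - 1
  · have hm0 : (k + q + 1) % N = 0 := by
      rw [hm, hcase]; simp
    rw [hm0]
    norm_num
    rw [PySem.List.pyGet?_neg_one, hRHS, List.getLast?_eq_getElem?]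
    have hrn : r.toNat = o.length - 1 := by omega
    rw [hrn]
  · have hmv : (k + q + 1) % N = r + 1 := by
      rw [hm]; exact Int.emod_eq_of_lt (by omega) (by omega)
    rw [hmv]
    norm_num
    rw [PySem.List.pyGet?_of_nonneg _ hr0, hRHS]


theorem car_spec_aux (o_arr : List Int) (q_arr : List Int) (k : Int) :
    car o_arr q_arr k = car_alt o_arr q_arr k := by
  unfold car car_alt
  by_cases h : o_arr.length ≤ 1
  · simp [h]
  · simp only [h]
    rw [PySem.List.foldl_append_singleton_eq_map]
    exact List.map_congr_left (fun q _ => car_elem_eq o_arr (by omega) k q)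

-- ===== VERDICT (by name: the statement is the Claim_ definition above) =====
theorem car_spec : Claim_equal_car := by
  intro o q k _
  exact car_spec_aux o q k
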